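-- pv_equiv track=rewrite | github.com/53b29461/lol-item-quiz | malignance_analysis.py | get_extended_family
-- ===== SOURCE A (Python) =====
-- def get_immediate_family(item_id, trees):
--     item_tree = trees.get(item_id)
--     if item_tree is None:
--         return []
--
--     family = []
--     if 'parents' in item_tree:
--         family.extend(item_tree['parents'])
--     if 'children' in item_tree:
--         family.extend(item_tree['children'])
--     return family
--
-- def get_extended_family(item_id, trees, items):
--     immediate_family = get_immediate_family(item_id, trees)
--     extended_family = set(immediate_family)  # Use a set to avoid duplicates
--
--     for family_member_id in immediate_family:
--         family_member_family = get_immediate_family(family_member_id, trees)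
--         for family_member_family_id in family_member_family:
--             family_member_family_member_family = get_immediate_family(family_member_family_id, trees)
--             extended_family.update(family_member_family_member_family)
--
--     return extended_family
-- ===== SOURCE B (Python) =====
-- def get_immediate_family(item_id, trees):
--     item_tree = trees.get(item_id)
--     if item_tree is None:
--         return []
--     family = []
--     if 'parents' in item_tree:
--         family.extend(item_tree['parents'])
--     if 'children' in item_tree:
--         family.extend(item_tree['children'])
--     return family
--
-- def get_extended_family(item_id, trees, items):
--     # Recursive decomposition: collect(node, d) lists the endpoints of all
--     # length-d neighbor paths from node; the answer is one final dedup of the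
--     # depth-1 and depth-3 path lists (no incremental set, no nested loops).
--     def collect(node, depth):
--         family = get_immediate_family(node, trees)
--         if depth == 1:
--             return family
--         return [z for y in family for z in collect(y, depth - 1)]
--     return set(collect(item_id, 1) + collect(item_id, 3))
-- ===== Notes on version B (the rewrite author's own statement) =====
-- stated objective: alternative
-- what changed: Replaced A's incremental set maintained by three nested loops with a recursive exact-depth path collector: collect(node,d) lists endpoints of all length-d neighbor paths by recursion on d, and the result is a single final dedup of collect(id,1)+collect(id,3).
import Mathlib
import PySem

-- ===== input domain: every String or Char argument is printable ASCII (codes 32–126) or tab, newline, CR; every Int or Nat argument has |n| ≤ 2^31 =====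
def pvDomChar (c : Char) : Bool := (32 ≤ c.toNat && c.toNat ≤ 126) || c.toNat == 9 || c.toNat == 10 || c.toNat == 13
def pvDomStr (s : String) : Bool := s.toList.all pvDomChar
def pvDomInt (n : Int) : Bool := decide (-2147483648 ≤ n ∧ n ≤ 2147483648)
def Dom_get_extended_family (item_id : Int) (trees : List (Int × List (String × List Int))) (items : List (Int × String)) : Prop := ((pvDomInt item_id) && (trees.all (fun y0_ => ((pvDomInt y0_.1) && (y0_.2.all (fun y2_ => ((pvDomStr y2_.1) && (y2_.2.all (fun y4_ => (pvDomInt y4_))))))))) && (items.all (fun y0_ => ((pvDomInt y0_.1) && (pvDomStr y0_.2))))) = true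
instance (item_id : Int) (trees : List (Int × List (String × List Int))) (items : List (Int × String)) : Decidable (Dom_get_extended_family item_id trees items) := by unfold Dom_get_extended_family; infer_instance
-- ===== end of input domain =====

-- B replaces A's incrementally maintained set with three nested loops by a recursive
-- exact-depth path collector and one final dedup; objective: alternative.

-- ===== PORT A =====
-- helper shared by both Pythons (same-module helper get_immediate_family)
def get_immediate_family (item_id : Int) (trees : List (Int × List (String × List Int))) : List Int :=
  match (PySem.Dict.mk trees).get? item_id with
  | none => []
  | some item_tree =>
    let d := PySem.Dict.mk item_tree
    let family : List Int := []
    let family := if d.contains "parents" then family ++ d.getD "parents" [] else family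
    let family := if d.contains "children" then family ++ d.getD "children" [] else family
    family

def get_extended_family (item_id : Int) (trees : List (Int × List (String × List Int))) (items : List (Int × String)) : List Int :=
  let immediate_family := get_immediate_family item_id trees
  let extended_family : PySem.Set Int := PySem.Set.ofList immediate_family
  immediate_family.foldl (fun ef family_member_id =>
    (get_immediate_family family_member_id trees).foldl (fun ef family_member_family_id =>
      PySem.Set.update ef (get_immediate_family family_member_family_id trees)) ef) extended_family

-- ===== PORT B =====
-- collect(node, depth) of Source B; depth 0 case is a totality guard (B only calls depths 1 and 3)
def pvCollect (trees : List (Int × List (String × List Int))) : Nat → Int → List Int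
  | 0, _ => []
  | 1, node => get_immediate_family node trees
  | (d+2), node => (get_immediate_family node trees).flatMap (fun y => pvCollect trees (d+1) y)

def get_extended_family_alt (item_id : Int) (trees : List (Int × List (String × List Int))) (items : List (Int × String)) : List Int :=
  PySem.Set.ofList (pvCollect trees 1 item_id ++ pvCollect trees 3 item_id)

-- ===== PRECONDITION & SPEC =====
def Spec_get_extended_family (item_id : Int) (trees : List (Int × List (String × List Int))) (items : List (Int × String)) (out : List Int) : Prop := out = get_extended_family_alt item_id trees items
instance (item_id : Int) (trees : List (Int × List (String × List Int))) (items : List (Int × String)) (out : List Int) : Decidable (Spec_get_extended_family item_id trees items out) := by unfold Spec_get_extended_family; infer_instance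

-- ===== CLAIM (what is proved, stated in full; the proofs are below) =====
def Claim_equal_get_extended_family : Prop := ∀ (item_id : Int) (trees : List (Int × List (String × List Int))) (items : List (Int × String)), Dom_get_extended_family item_id trees items → Spec_get_extended_family item_id trees items (get_extended_family item_id trees items)

-- ===== LEMMAS AND PROOFS =====

theorem update_append (s a b : List Int) :
    PySem.Set.update s (a ++ b) = PySem.Set.update (PySem.Set.update s a) b := by
  simp [PySem.Set.update, List.foldl_append]

theorem foldl_update (g : Int → List Int) :
    ∀ (l : List Int) (s : PySem.Set Int),
      l.foldl (fun s y => PySem.Set.update s (g y)) s = PySem.Set.update s (l.flatMap g) := by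
  intro l
  induction l with
  | nil => intro s; rfl
  | cons x l ih => intro s; simp only [List.foldl_cons, List.flatMap_cons, update_append, ih]

theorem ofList_append (a b : List Int) :
    PySem.Set.ofList (a ++ b) = PySem.Set.update (PySem.Set.ofList a) b := by
  simp [PySem.Set.ofList_eq_foldl, PySem.Set.update, List.foldl_append]

-- ===== VERDICT (by name: the statement is the Claim_ definition above) =====
theorem get_extended_family_spec : Claim_equal_get_extended_family := by
  intro item_id trees items _
  show get_extended_family item_id trees items = get_extended_family_alt item_id trees items
  unfold get_extended_family get_extended_family_alt
  simp only [pvCollect, foldl_update (fun y => get_immediate_family y trees), ofList_append]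
  rw [foldl_update (fun m => (get_immediate_family m trees).flatMap
        (fun y => get_immediate_family y trees))]
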